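-- pv_equiv track=rewrite | github.com/khelwood/advent-of-code | 2025/d09_rectangle.py | check_colour
-- ===== SOURCE A (Python) =====
-- from itertools import combinations, product
--
-- def check_colour(grid, a, b):
--     ax,ay = a
--     bx,by = b
--     x0 = min(ax,bx)
--     y0 = min(ay,by)
--     x1 = max(ax,bx)+1
--     y1 = max(ay,by)+1
--     return all(p in grid for p in product(range(x0,x1), range(y0,y1)))
-- ===== SOURCE B (Python) =====
-- def check_colour(grid, a, b):
--     ax, ay = a
--     bx, by = b
--     x0, x1 = min(ax, bx), max(ax, bx)
--     y0, y1 = min(ay, by), max(ay, by)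
--     inside = {(x, y) for (x, y) in grid if x0 <= x <= x1 and y0 <= y <= y1}
--     return len(inside) == (x1 - x0 + 1) * (y1 - y0 + 1)
-- ===== Notes on version B (the rewrite author's own statement) =====
-- stated objective: alternative
-- what changed: Instead of enumerating every cell of the rectangle and testing membership, B makes one pass over the grid, collects the distinct points lying in the rectangle, and compares their count with the rectangle's area w*h; uniqueness of set elements makes count==area equivalent to all cells present.
import Mathlib
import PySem

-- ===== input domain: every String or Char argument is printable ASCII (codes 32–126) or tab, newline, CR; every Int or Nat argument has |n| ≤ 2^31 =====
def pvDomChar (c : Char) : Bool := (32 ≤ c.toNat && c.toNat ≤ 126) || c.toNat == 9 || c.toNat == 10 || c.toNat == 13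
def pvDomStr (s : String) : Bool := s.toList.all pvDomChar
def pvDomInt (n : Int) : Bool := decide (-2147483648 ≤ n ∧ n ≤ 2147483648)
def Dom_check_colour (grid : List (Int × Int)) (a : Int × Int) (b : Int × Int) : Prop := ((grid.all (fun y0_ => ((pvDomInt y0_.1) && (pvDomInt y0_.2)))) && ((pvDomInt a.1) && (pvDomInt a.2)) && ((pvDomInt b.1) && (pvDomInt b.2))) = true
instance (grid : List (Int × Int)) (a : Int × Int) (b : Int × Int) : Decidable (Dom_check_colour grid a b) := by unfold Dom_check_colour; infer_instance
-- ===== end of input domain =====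

-- B replaces A's scan over every rectangle cell by one pass over the grid set:
-- the number of distinct grid points inside the rectangle equals its area iff every cell is present (objective: alternative).

-- ===== PORT A =====
-- Lazy 'all(... for x in range(lo, hi))': short-circuits at the first False and never
-- materializes the range, exactly like Python's generator over range (hand port, exact).
def pvAllRange (lo hi : Int) (f : Int → Bool) : Bool :=
  if h : lo < hi then f lo && pvAllRange (lo + 1) hi f
  else true
termination_by (hi - lo).toNat
decreasing_by omega

def check_colour (grid : List (Int × Int)) (a : Int × Int) (b : Int × Int) : Bool :=
  let ax := a.1; let ay := a.2
  let bx := b.1; let by_ := b.2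
  let x0 := min ax bx
  let y0 := min ay by_
  let x1 := max ax bx + 1
  let y1 := max ay by_ + 1
  -- all(p in grid for p in product(range(x0,x1), range(y0,y1))) — product order, short-circuiting like the generator
  pvAllRange x0 x1 (fun x =>
    pvAllRange y0 y1 (fun y => grid.contains (x, y)))

-- ===== PORT B =====
def check_colour_alt (grid : List (Int × Int)) (a : Int × Int) (b : Int × Int) : Bool :=
  let x0 := min a.1 b.1
  let x1 := max a.1 b.1
  let y0 := min a.2 b.2
  let y1 := max a.2 b.2
  let inside : PySem.Set (Int × Int) :=
    PySem.Set.ofList (grid.filter (fun p =>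
      decide (x0 ≤ p.1 ∧ p.1 ≤ x1 ∧ y0 ≤ p.2 ∧ p.2 ≤ y1)))
  ((PySem.Set.len inside : Int) == (x1 - x0 + 1) * (y1 - y0 + 1))

-- ===== PRECONDITION & SPEC =====
def Spec_check_colour (grid : List (Int × Int)) (a : Int × Int) (b : Int × Int) (out : Bool) : Prop := out = check_colour_alt grid a b
instance (grid : List (Int × Int)) (a : Int × Int) (b : Int × Int) (out : Bool) : Decidable (Spec_check_colour grid a b out) := by unfold Spec_check_colour; infer_instance

-- ===== CLAIM (what is proved, stated in full; the proofs are below) =====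
def Claim_equal_check_colour : Prop := ∀ (grid : List (Int × Int)) (a : Int × Int) (b : Int × Int), Dom_check_colour grid a b → Spec_check_colour grid a b (check_colour grid a b)

-- ===== LEMMAS AND PROOFS =====

-- The rectangle [x0,x1] × [y0,y1] as a Finset.
noncomputable def pvRect (x0 x1 y0 y1 : Int) : Finset (Int × Int) := Finset.Icc x0 x1 ×ˢ Finset.Icc y0 y1

lemma pvRect_card (x0 x1 y0 y1 : Int) (hx : x0 ≤ x1) (hy : y0 ≤ y1) :
    ((pvRect x0 x1 y0 y1).card : Int) = (x1 - x0 + 1) * (y1 - y0 + 1) := by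
  rw [pvRect, Finset.card_product, Int.card_Icc, Int.card_Icc]
  push_cast [Int.toNat_of_nonneg (show (0:Int) ≤ x1 + 1 - x0 by omega),
             Int.toNat_of_nonneg (show (0:Int) ≤ y1 + 1 - y0 by omega)]
  ring

-- The distinct in-window grid points, as a Finset, sit inside the rectangle.
lemma pvInside_subset (grid : List (Int × Int)) (x0 x1 y0 y1 : Int) :
    (PySem.Set.ofList (grid.filter (fun p =>
      decide (x0 ≤ p.1 ∧ p.1 ≤ x1 ∧ y0 ≤ p.2 ∧ p.2 ≤ y1)))).toFinset ⊆ pvRect x0 x1 y0 y1 := by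
  intro q hq
  simp only [List.mem_toFinset, PySem.Set.mem_ofList, List.mem_filter, decide_eq_true_eq] at hq
  simp only [pvRect, Finset.mem_product, Finset.mem_Icc]
  exact ⟨⟨hq.2.1, hq.2.2.1⟩, hq.2.2.2.1, hq.2.2.2.2⟩

-- Core equivalence: the count-equals-area test says exactly "every rectangle cell is in grid".
lemma pvKey (grid : List (Int × Int)) (x0 x1 y0 y1 : Int) (hx : x0 ≤ x1) (hy : y0 ≤ y1) :
    (((PySem.Set.ofList (grid.filter (fun p =>
        decide (x0 ≤ p.1 ∧ p.1 ≤ x1 ∧ y0 ≤ p.2 ∧ p.2 ≤ y1)))).length : Int)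
      = (x1 - x0 + 1) * (y1 - y0 + 1))
    ↔ (∀ p : Int × Int, x0 ≤ p.1 → p.1 ≤ x1 → y0 ≤ p.2 → p.2 ≤ y1 → p ∈ grid) := by
  set P : Int × Int → Bool := fun p => decide (x0 ≤ p.1 ∧ p.1 ≤ x1 ∧ y0 ≤ p.2 ∧ p.2 ≤ y1) with hP
  set S : List (Int × Int) := PySem.Set.ofList (grid.filter P) with hS
  have hnd : S.Nodup := PySem.Set.nodup_ofList _
  have hcard : S.toFinset.card = S.length := List.toFinset_card_of_nodup hnd
  have hsub : S.toFinset ⊆ pvRect x0 x1 y0 y1 := pvInside_subset grid x0 x1 y0 y1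
  constructor
  · intro hlen p hp1 hp2 hp3 hp4
    have hcards : (pvRect x0 x1 y0 y1).card ≤ S.toFinset.card := by
      have : ((S.toFinset.card : Int)) = ((pvRect x0 x1 y0 y1).card : Int) := by
        rw [hcard, hlen, pvRect_card x0 x1 y0 y1 hx hy]
      omega
    have heq := Finset.eq_of_subset_of_card_le hsub hcards
    have : p ∈ S.toFinset := by
      rw [heq]
      simp only [pvRect, Finset.mem_product, Finset.mem_Icc]
      exact ⟨⟨hp1, hp2⟩, hp3, hp4⟩
    simp only [List.mem_toFinset, hS, PySem.Set.mem_ofList, List.mem_filter] at this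
    exact this.1
  · intro hall
    have hsup : pvRect x0 x1 y0 y1 ⊆ S.toFinset := by
      intro q hq
      simp only [pvRect, Finset.mem_product, Finset.mem_Icc] at hq
      simp only [List.mem_toFinset, hS, PySem.Set.mem_ofList, List.mem_filter, hP,
        decide_eq_true_eq]
      exact ⟨hall q hq.1.1 hq.1.2 hq.2.1 hq.2.2, hq.1.1, hq.1.2, hq.2.1, hq.2.2⟩
    have heq : S.toFinset = pvRect x0 x1 y0 y1 := Finset.Subset.antisymm hsub hsup
    rw [← hcard, heq, pvRect_card x0 x1 y0 y1 hx hy]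

lemma pvAllRange_iff (lo hi : Int) (f : Int → Bool) :
    pvAllRange lo hi f = true ↔ ∀ x : Int, lo ≤ x → x < hi → f x = true := by
  fun_induction pvAllRange lo hi f with
  | case1 lo h ih =>
    rw [Bool.and_eq_true, ih]
    constructor
    · rintro ⟨h0, hr⟩ x hx1 hx2
      rcases eq_or_lt_of_le hx1 with rfl | hlt
      · exact h0
      · exact hr x (by omega) hx2
    · intro hall
      exact ⟨hall lo le_rfl h, fun x hx1 hx2 => hall x (by omega) hx2⟩
  | case2 lo =>
    rename_i hnot
    constructor
    · intro _ x hx1 hx2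
      exact absurd hx2 (by omega)
    · intro _
      rfl

-- A's nested-range scan says the same thing.
lemma pvA_iff (grid : List (Int × Int)) (x0 x1 y0 y1 : Int) :
    (pvAllRange x0 (x1 + 1) (fun x =>
        pvAllRange y0 (y1 + 1) (fun y => grid.contains (x, y))) = true)
    ↔ (∀ p : Int × Int, x0 ≤ p.1 → p.1 ≤ x1 → y0 ≤ p.2 → p.2 ≤ y1 → p ∈ grid) := by
  simp only [pvAllRange_iff, List.contains_iff_mem]
  constructor
  · rintro h ⟨px, py⟩ h1 h2 h3 h4
    exact h px h1 (by omega) py h3 (by omega)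
  · rintro h x hx1 hx2 y hy1 hy2
    exact h (x, y) hx1 (by omega) hy1 (by omega)

lemma pv_main (grid : List (Int × Int)) (a b : Int × Int) :
    check_colour grid a b = check_colour_alt grid a b := by
  unfold check_colour check_colour_alt
  have hx : min a.1 b.1 ≤ max a.1 b.1 := min_le_max
  have hy : min a.2 b.2 ≤ max a.2 b.2 := min_le_max
  rw [Bool.eq_iff_iff, pvA_iff grid (min a.1 b.1) (max a.1 b.1) (min a.2 b.2) (max a.2 b.2)]
  rw [show ∀ u v : Int, (u == v) = true ↔ u = v from fun u v => beq_iff_eq]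
  exact (pvKey grid _ _ _ _ hx hy).symm

-- ===== VERDICT (by name: the statement is the Claim_ definition above) =====
theorem check_colour_spec : Claim_equal_check_colour := by
  intro grid a b _
  unfold Spec_check_colour
  exact pv_main grid a b
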